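-- pv_equiv track=rewrite | github.com/JanvandenBrand/mooc-software-testing-python | src/ghappy.py | ghappy
-- ===== SOURCE A (Python) =====
-- def ghappy(string):
--     assert string is not None
--     for i in range(0, len(string)):
--         if string[i] == "g":
--             if i > 0 and string[i-1] == "g":
--                 continue
--             if i + 1 < len(string) and string[i+1] == "g":
--                 continue
--             return False
--
--     return True
-- ===== SOURCE B (Python) =====
-- def ghappy(string):
--     assert string is not None
--     # run-length encode the string, then check no run is a lone 'g'
--     runs = []
--     for ch in string:
--         if runs and runs[-1][0] == ch:
--             runs[-1][1] += 1
--         else: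
--             runs.append([ch, 1])
--     return all(not (ch == 'g' and n == 1) for ch, n in runs)
-- ===== Notes on version B (the rewrite author's own statement) =====
-- stated objective: alternative
-- what changed: B run-length-encodes the string into maximal runs in one pass and then checks that no run is a singleton 'g', instead of A's per-index neighbour inspection with early return.
import Mathlib
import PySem

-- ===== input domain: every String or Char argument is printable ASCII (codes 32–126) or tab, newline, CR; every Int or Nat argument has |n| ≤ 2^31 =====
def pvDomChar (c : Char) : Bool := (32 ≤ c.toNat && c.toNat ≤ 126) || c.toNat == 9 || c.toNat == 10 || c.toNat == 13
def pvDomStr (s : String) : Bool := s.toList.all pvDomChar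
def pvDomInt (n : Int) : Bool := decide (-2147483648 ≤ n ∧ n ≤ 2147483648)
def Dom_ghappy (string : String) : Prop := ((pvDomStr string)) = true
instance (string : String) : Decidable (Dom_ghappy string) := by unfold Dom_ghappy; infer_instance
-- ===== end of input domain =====

-- B run-length-encodes the string into maximal runs and checks that no run is a lone 'g';
-- A inspects each index's neighbours.  Same cost; the objective is an alternative decomposition.

-- ===== PORT A =====
-- A's index loop: for i in range(0, len(string)), early `return False`, `continue` = recurse
-- on i+1.  string[i], string[i-1], string[i+1] are only read in range, so List.getD is exact.
def ghappyLoop (s : List Char) (i : Nat) : Bool :=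
  if _h : i < s.length then
    if s.getD i ' ' == 'g' then
      if decide (0 < i) && (s.getD (i - 1) ' ' == 'g') then ghappyLoop s (i + 1)
      else if decide (i + 1 < s.length) && (s.getD (i + 1) ' ' == 'g') then ghappyLoop s (i + 1)
      else false
    else ghappyLoop s (i + 1)
  else true
termination_by s.length - i

def ghappy (string : String) : Bool := ghappyLoop string.toList 0

-- ===== PORT B =====
-- B's test `ch == 'g' and n == 1` on one run
def badRun (p : Char × Nat) : Bool := p.1 == 'g' && p.2 == 1

-- one step of B's run-length loop; the accumulator keeps the runs most-recent-first
-- (Python's `runs[-1]` is the head here), reversed back at the end before the all-check.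
def runStep (acc : List (Char × Nat)) (c : Char) : List (Char × Nat) :=
  match acc with
  | (d, n) :: r => if d == c then (d, n + 1) :: r else (c, 1) :: (d, n) :: r
  | [] => [(c, 1)]

def ghappy_alt (string : String) : Bool :=
  ((string.toList.foldl runStep []).reverse).all (fun p => !badRun p)

-- ===== PRECONDITION & SPEC =====
def Spec_ghappy (string : String) (out : Bool) : Prop := out = ghappy_alt string
instance (string : String) (out : Bool) : Decidable (Spec_ghappy string out) := by unfold Spec_ghappy; infer_instance

-- ===== CLAIM (what is proved, stated in full; the proofs are below) =====
def Claim_equal_ghappy : Prop := ∀ (string : String), Dom_ghappy string → Spec_ghappy string (ghappy string)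

-- ===== LEMMAS AND PROOFS =====

-- middle-ground semantics: scan from the left remembering only whether the previous char was 'g'
def okG (gPrev : Bool) : List Char → Bool
  | [] => true
  | c :: cs => if c == 'g' then (gPrev || cs.head? == some 'g') && okG true cs else okG false cs

-- behaviour of B's all-check given an open run (d, n) and the rest l of the string
def auxB (d : Char) (n : Nat) : List Char → Bool
  | [] => !badRun (d, n)
  | c :: cs => if d == c then auxB d (n + 1) cs else (!badRun (d, n)) && auxB c 1 cs

lemma foldl_runStep_eq (l : List Char) : ∀ (d : Char) (n : Nat) (r : List (Char × Nat)),
    (l.foldl runStep ((d, n) :: r)).all (fun p => !badRun p) =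
      (r.all (fun p => !badRun p) && auxB d n l) := by
  induction l with
  | nil => intro d n r; simp [auxB, Bool.and_comm]
  | cons c cs ih =>
      intro d n r
      by_cases h : d == c
      · rw [List.foldl_cons]
        simp only [runStep, h, if_true]
        rw [ih, auxB]
        simp [h]
      · rw [List.foldl_cons]
        simp only [runStep, h, if_false, Bool.false_eq_true]
        rw [ih, auxB]
        simp only [List.all_cons, h]
        cases r.all (fun p => !badRun p) <;> cases auxB c 1 cs <;> cases badRun (d, n) <;> simp
  
lemma auxB_eq_okG (l : List Char) : ∀ (d : Char) (n : Nat), 0 < n →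
    auxB d n l = (if d == 'g' then (if n == 1 then ((l.head? == some 'g') && okG true l) else okG true l) else okG false l) := by
  induction l with
  | nil =>
      intro d n _
      by_cases hd : d == 'g' <;> by_cases h1 : n == 1 <;> simp [auxB, badRun, okG, hd, h1]
  | cons c cs ih =>
      intro d n hn
      by_cases hdc : d == c
      · have step : auxB d n (c :: cs) = auxB d (n + 1) cs := by simp [auxB, hdc]
        rw [step, ih d (n + 1) (by omega)]
        have hce : d = c := beq_iff_eq.mp hdc
        by_cases hd : d == 'g'
        · have hcg : c = 'g' := by rw [← hce]; exact beq_iff_eq.mp hd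
          subst hcg
          have hde : d = 'g' := beq_iff_eq.mp hd
          subst hde
          have h2 : (n + 1 == 1) = false := by simp; omega
          simp [h2, okG]
        · have hcg : (c == 'g') = false := by
            rw [← hce]; exact Bool.not_eq_true _ ▸ (by simpa using hd)
          simp [hd, hcg, okG]
      · have step : auxB d n (c :: cs) = ((!badRun (d, n)) && auxB c 1 cs) := by
          simp [auxB, hdc]
        rw [step, ih c 1 (by omega)]
        by_cases hc : c == 'g'
        · have hcg : c = 'g' := beq_iff_eq.mp hc
          subst hcg
          have hd : (d == 'g') = false := by
            simpa using hdc
          simp [badRun, hd, okG]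
        · by_cases hd : d == 'g'
          · by_cases h1 : n == 1
            · simp [badRun, hd, h1, hc, okG]
            · simp [badRun, hd, h1, hc, okG]
          · simp [badRun, hd, hc, okG]

lemma okG_eq_alt (l : List Char) :
    okG false l = ((l.foldl runStep []).reverse).all (fun p => !badRun p) := by
  rw [List.all_reverse]
  cases l with
  | nil => simp [okG]
  | cons c cs =>
      rw [List.foldl_cons]
      simp only [runStep]
      rw [foldl_runStep_eq cs c 1 [], auxB_eq_okG cs c 1 (by omega)]
      by_cases hc : c == 'g' <;> simp [okG, hc]

lemma ghappyLoop_eq : ∀ (k : Nat) (s : List Char) (i : Nat), s.length - i = k →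
    ghappyLoop s i = okG (decide (0 < i) && (s.getD (i - 1) ' ' == 'g')) (s.drop i) := by
  intro k
  induction k with
  | zero =>
      intro s i hk
      have hlen : s.length ≤ i := by omega
      rw [ghappyLoop]
      simp [Nat.not_lt.mpr hlen, List.drop_eq_nil_iff.mpr hlen, okG]
  | succ k ih =>
      intro s i hk
      have hi : i < s.length := by omega
      have hdrop : s.drop i = s[i] :: s.drop (i + 1) := List.drop_eq_getElem_cons hi
      have hgetD : s.getD i ' ' = s[i] := List.getD_eq_getElem s ' ' hi
      have ih' := ih s (i + 1) (by omega)
      have e1 : i + 1 - 1 = i := by omega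
      rw [e1, hgetD] at ih'
      have e2 : (decide (0 < i + 1) && (s[i] == 'g')) = (s[i] == 'g') := by simp
      rw [e2] at ih'
      have hhead : ((s.drop (i + 1)).head? == some 'g') =
          (decide (i + 1 < s.length) && (s.getD (i + 1) ' ' == 'g')) := by
        rw [List.head?_drop]
        by_cases hn : i + 1 < s.length
        · rw [List.getElem?_eq_getElem hn, List.getD_eq_getElem s ' ' hn]
          simp [hn]
        · rw [List.getElem?_eq_none (by omega : s.length ≤ i + 1)]
          simp [hn]
      rw [ghappyLoop, dif_pos hi, hdrop]
      by_cases hA : (s[i] == 'g')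
      · rw [if_pos (show (s.getD i ' ' == 'g') = true by rw [hgetD]; exact hA)]
        have hG : ghappyLoop s (i + 1) = okG true (s.drop (i + 1)) := by rw [ih', hA]
        have hokg : okG (decide (0 < i) && (s.getD (i - 1) ' ' == 'g')) (s[i] :: s.drop (i + 1)) =
            (((decide (0 < i) && (s.getD (i - 1) ' ' == 'g')) ||
              (decide (i + 1 < s.length) && (s.getD (i + 1) ' ' == 'g')))
              && okG true (s.drop (i + 1))) := by
          rw [← hhead]; simp [okG, hA]
        rw [hokg, hG]
        cases hB1 : (decide (0 < i) && (s.getD (i - 1) ' ' == 'g'))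
        · simp only [if_false, Bool.false_or, Bool.false_eq_true]
          cases hB2 : (decide (i + 1 < s.length) && (s.getD (i + 1) ' ' == 'g')) <;> simp
        · simp
      · rw [if_neg (show ¬ (s.getD i ' ' == 'g') = true by rw [hgetD]; simpa using hA)]
        have hAf : (s[i] == 'g') = false := by simpa using hA
        rw [ih', hAf]
        simp [okG, hAf]

-- ===== VERDICT (by name: the statement is the Claim_ definition above) =====
theorem ghappy_spec : Claim_equal_ghappy := by
  intro string _
  unfold Spec_ghappy ghappy ghappy_alt
  rw [ghappyLoop_eq (string.toList.length - 0) string.toList 0 rfl]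
  simpa using okG_eq_alt string.toList
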